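-- pv_equiv track=rewrite | github.com/Akashdeep-Patra/problemSolving | Stacks/n intergers containing 1,2,3.py | solve
-- ===== SOURCE A (Python) =====
-- from collections import deque
--
-- def solve(n):
--     a=deque([[""]])
--     counter=0
--     ans=[]
--     while(counter<n):
--         x=a.popleft()
--         for i in range(1,4):
--             a.append(x+[str(i)])
--             ans.append(int("".join(a[-1])))
--             counter+=1
--     return ans[:n]
-- ===== SOURCE B (Python) =====
-- def solve(n):
--     # Positional conversion: the k-th number (1-based) is the bijective base-3
--     # numeral of k over digits {1,2,3}; no BFS queue needed.
--     res = []
--     for k in range(1, n + 1):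
--         digits = []
--         while k:
--             k -= 1
--             digits.append(str(k % 3 + 1))
--             k //= 3
--         res.append(int("".join(reversed(digits))))
--     return res
-- ===== Notes on version B (the rewrite author's own statement) =====
-- stated objective: alternative
-- what changed: Replaces A's BFS deque of growing digit-string prefixes (plus a trailing slice to trim overshoot) by an independent per-index conversion: the k-th number is the bijective base-three numeral of k over the digit set one..three, built by repeated decrement-mod-div.
import Mathlib
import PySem

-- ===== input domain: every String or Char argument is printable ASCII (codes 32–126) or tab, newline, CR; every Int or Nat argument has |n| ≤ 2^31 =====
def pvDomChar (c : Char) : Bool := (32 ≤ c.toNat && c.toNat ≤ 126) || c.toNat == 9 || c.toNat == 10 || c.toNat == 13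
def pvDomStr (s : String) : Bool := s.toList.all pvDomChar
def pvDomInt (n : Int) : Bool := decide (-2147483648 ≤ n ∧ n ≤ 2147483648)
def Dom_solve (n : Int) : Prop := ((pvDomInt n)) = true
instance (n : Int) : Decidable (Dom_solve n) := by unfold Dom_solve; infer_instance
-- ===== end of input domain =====

-- B replaces A's BFS deque of growing digit-string prefixes by an independent
-- bijective base-3 conversion of each index k = 1..n (objective: alternative).

-- ===== PORT A =====
-- inner 'for i in range(1,4)' body, folded over the range; state = (deque, ans, counter)
def solveInner (x : List String) (st : List (List String) × List Int × Int) (i : Int) :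
    List (List String) × List Int × Int :=
  let a' := st.1 ++ [x ++ [PySem.Int.toStr i]]                      -- a.append(x+[str(i)])
  -- a[-1] is the element just appended; .getD [] is only a totality guard (never hit)
  let last := (PySem.List.pyGet? a' (-1)).getD []
  -- int("".join(a[-1])); the string is always pure digits, so ofStr? is some; .getD 0 is a totality guard
  (a', st.2.1 ++ [(PySem.Int.ofStr? (PySem.Str.join "" last)).getD 0], st.2.2 + 1)

-- termination helper for the while loop: each pass adds 3 to counter
theorem solveInner_counter (x : List String) (rest : List (List String))
    (ans : List Int) (counter : Int) :
    ((PySem.List.pyRange 1 4 1).foldl (solveInner x) (rest, ans, counter)).2.2 = counter + 3 := by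
  have h : PySem.List.pyRange 1 4 1 = [1, 2, 3] := by decide
  simp [h, solveInner]
  omega

-- while(counter<n): pop-left, push the three children, record their int values
def solveLoop (n : Int) (a : List (List String)) (counter : Int) (ans : List Int) : List Int :=
  if _h : counter < n then
    match a with
    | [] => ans      -- unreachable totality guard: the deque is never empty (popleft would raise)
    | x :: rest =>
      let st := (PySem.List.pyRange 1 4 1).foldl (solveInner x) (rest, ans, counter)
      solveLoop n st.1 st.2.2 st.2.1
  else ans
termination_by (n - counter).toNat
decreasing_by
  simp only [solveInner_counter]
  omega

def solve (n : Int) : List Int :=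
  PySem.List.slice (solveLoop n [[""]] 0 []) none (some n)          -- ans[:n]

-- ===== PORT B =====
-- while k: k-=1; digits.append(str(k%3+1)); k//=3
def altDigits (k : Int) (digits : List String) : List String :=
  if _h : 0 < k then        -- 'while k': k is always ≥ 0 here, so k ≠ 0 ↔ 0 < k (totality guard)
    -- k' here is Python's k after 'k -= 1'
    altDigits (PySem.Int.floordiv (k - 1) 3) (digits ++ [PySem.Int.toStr (PySem.Int.mod (k - 1) 3 + 1)])
  else digits
termination_by k.toNat
decreasing_by
  simp [PySem.Int.floordiv, Int.fdiv_eq_ediv]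
  omega

def solve_alt (n : Int) : List Int :=
  (PySem.List.pyRange 1 (n + 1) 1).foldl
    (fun res k =>
      let ds := altDigits k []
      res ++ [(PySem.Int.ofStr? (PySem.Str.join "" ds.reverse)).getD 0])   -- int("".join(reversed(digits)))
    []

-- ===== PRECONDITION & SPEC =====
def Spec_solve (n : Int) (out : List Int) : Prop := out = solve_alt n
instance (n : Int) (out : List Int) : Decidable (Spec_solve n out) := by unfold Spec_solve; infer_instance

-- ===== CLAIM (what is proved, stated in full; the proofs are below) =====
def Claim_equal_solve : Prop := ∀ (n : Int), Dom_solve n → Spec_solve n (solve n)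

-- ===== LEMMAS AND PROOFS =====

-- digit-string list of the bijective base-3 numeral of m (most significant first)
def drep : ℕ → List String
  | 0 => []
  | (m + 1) => drep (m / 3) ++ [PySem.Int.toStr (((m % 3 : ℕ) : ℤ) + 1)]

-- the Int value both programs store for index j
def aelem (j : ℕ) : Int :=
  (PySem.Int.ofStr? (PySem.Str.join "" (drep j))).getD 0

theorem floordiv_natCast (m : ℕ) : PySem.Int.floordiv (m : ℤ) 3 = ((m / 3 : ℕ) : ℤ) := by
  simp [PySem.Int.floordiv, Int.fdiv_eq_ediv]

theorem mod_natCast (m : ℕ) : PySem.Int.mod (m : ℤ) 3 = ((m % 3 : ℕ) : ℤ) := by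
  simp [PySem.Int.mod, Int.fmod_eq_emod]

theorem drep_step (j i : ℕ) (h1 : 1 ≤ i) (h2 : i ≤ 3) :
    drep (3 * j + i) = drep j ++ [PySem.Int.toStr (i : ℤ)] := by
  have he : 3 * j + i = (3 * j + (i - 1)) + 1 := by omega
  rw [he]
  conv_lhs => rw [drep]
  have hd : (3 * j + (i - 1)) / 3 = j := by omega
  have hm : (3 * j + (i - 1)) % 3 = i - 1 := by omega
  have hc : (((3 * j + (i - 1)) % 3 : ℕ) : ℤ) + 1 = (i : ℤ) := by
    rw [hm]; omega
  rw [hd, hc]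

-- B's inner while loop computes the reversed digit list
theorem altDigits_eq (m : ℕ) : ∀ acc : List String,
    altDigits (m : ℤ) acc = acc ++ (drep m).reverse := by
  induction m using Nat.strong_induction_on with
  | _ m ih =>
    intro acc
    match m with
    | 0 => simp [altDigits, drep]
    | (k + 1) =>
      rw [altDigits]
      have hpos : (0 : ℤ) < ((k + 1 : ℕ) : ℤ) := by positivity
      rw [dif_pos hpos]
      have hk : ((k + 1 : ℕ) : ℤ) - 1 = (k : ℤ) := by push_cast; ring
      rw [hk, floordiv_natCast, mod_natCast,
        ih (k / 3) (by omega) (acc ++ [PySem.Int.toStr (((k % 3 : ℕ) : ℤ) + 1)])]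
      conv_rhs => rw [drep]
      simp

theorem chars_join_nil_cons (ls : List (List Char)) :
    PySem.Chars.join [] ([] :: ls) = PySem.Chars.join [] ls := by
  cases ls with
  | nil => rfl
  | cons b l => rw [PySem.Chars.join_cons_cons]; simp

-- joining "" :: L is the same as joining L (the empty prefix contributes nothing)
theorem join_empty_cons (L : List String) :
    PySem.Str.join "" ("" :: L) = PySem.Str.join "" L := by
  simp only [PySem.Str.join, List.map_cons]
  rw [show ("" : String).toList = [] from rfl, chars_join_nil_cons]

-- one pass of A's while loop, in closed form over the BFS index t
theorem loop_step (n : Int) (t : ℕ) (h : (3 * t : ℤ) < n) :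
    solveLoop n ((List.range' t (2 * t + 1)).map (fun j => "" :: drep j)) (3 * t)
      ((List.range' 1 (3 * t)).map aelem)
    = solveLoop n ((List.range' (t + 1) (2 * (t + 1) + 1)).map (fun j => "" :: drep j))
        (3 * (t + 1)) ((List.range' 1 (3 * (t + 1))).map aelem) := by
  have hcons : (List.range' t (2 * t + 1)).map (fun j => "" :: drep j)
      = ("" :: drep t) :: (List.range' (t + 1) (2 * t)).map (fun j => "" :: drep j) := by
    rw [List.range'_succ]; simp
  rw [hcons, solveLoop.eq_def, dif_pos h]
  have hpy : PySem.List.pyRange 1 4 1 = [1, 2, 3] := by decide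
  -- evaluate the three-step fold
  simp only [hpy, List.foldl_cons, List.foldl_nil, solveInner,
    PySem.List.pyGet?_neg_one_append_singleton, Option.getD_some]
  -- identify each pushed prefix with drep of its index, and each value with aelem
  have hd1 : drep t ++ [PySem.Int.toStr 1] = drep (3 * t + 1) := by
    rw [drep_step t 1 (by omega) (by omega)]; norm_num
  have hd2 : drep t ++ [PySem.Int.toStr 2] = drep (3 * t + 2) := by
    rw [drep_step t 2 (by omega) (by omega)]; norm_num
  have hd3 : drep t ++ [PySem.Int.toStr 3] = drep (3 * t + 3) := by
    rw [drep_step t 3 (by omega) (by omega)]; norm_num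
  have hv : ∀ i : ℕ, 1 ≤ i → i ≤ 3 →
      (PySem.Int.ofStr? (PySem.Str.join "" ("" :: drep (3 * t + i)))).getD 0 = aelem (3 * t + i) := by
    intro i _ _; rw [join_empty_cons, aelem]
  simp only [List.cons_append]
  rw [hd1, hd2, hd3, hv 1 (by omega) (by omega), hv 2 (by omega) (by omega),
    hv 3 (by omega) (by omega)]
  -- now both sides are solveLoop applied to equal states
  have hdq : List.range' (t + 1) (2 * (t + 1) + 1) =
      List.range' (t + 1) (2 * t) ++ [3 * t + 1, 3 * t + 2, 3 * t + 3] := by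
    have h3 : 2 * (t + 1) + 1 = 2 * t + 1 + 1 + 1 := by ring
    rw [h3, List.range'_concat, List.range'_concat, List.range'_concat]
    simp
    omega
  have hans : (List.range' 1 (3 * t)).map aelem ++ [aelem (3 * t + 1)]
      ++ [aelem (3 * t + 2)] ++ [aelem (3 * t + 3)]
      = (List.range' 1 (3 * (t + 1))).map aelem := by
    have h3 : 3 * (t + 1) = 3 * t + 1 + 1 + 1 := by ring
    rw [h3, List.range'_concat, List.range'_concat, List.range'_concat]
    simp [show 1 + 3 * t = 3 * t + 1 from by omega, show 1 + (3 * t + 1) = 3 * t + 2 from by omega,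
      show 1 + (3 * t + 2) = 3 * t + 3 from by omega]
  rw [hdq, hans, show (3 * (t : ℤ) + 1 + 1 + 1) = 3 * ((t : ℤ) + 1) from by ring]
  simp

-- A's loop runs until 3*T ≥ n and returns the values for indices 1..3T
theorem loop_result (n : Int) : ∀ t : ℕ,
    ∃ T : ℕ, n ≤ 3 * T ∧
      solveLoop n ((List.range' t (2 * t + 1)).map (fun j => "" :: drep j)) (3 * t)
        ((List.range' 1 (3 * t)).map aelem)
      = (List.range' 1 (3 * T)).map aelem := by
  intro t
  by_cases h : (3 * t : ℤ) < n
  · have hfuel : (n - 3 * (t + 1) : ℤ).toNat < (n - 3 * t : ℤ).toNat := by omega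
    obtain ⟨T, hT, hres⟩ := loop_result n (t + 1)
    refine ⟨T, hT, ?_⟩
    rw [loop_step n t h]
    push_cast at hres ⊢
    exact hres
  · refine ⟨t, by omega, ?_⟩
    rw [solveLoop.eq_def, dif_neg (by omega)]
termination_by t => (n - 3 * t : ℤ).toNat

theorem take_range' (n m : ℕ) (h : n ≤ m) :
    (List.range' 1 m).take n = List.range' 1 n := by
  simp [List.range'_eq_map_range, ← List.map_take, List.take_range, Nat.min_eq_left h]

-- B's fold over the range appends one value per index
theorem foldl_append_map {α β : Type} (g : α → β) (xs : List α) :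
    ∀ acc : List β, xs.foldl (fun r k => r ++ [g k]) acc = acc ++ xs.map g := by
  induction xs with
  | nil => simp
  | cons x xs ih => intro acc; simp [ih]

theorem solve_alt_eq (n : Int) :
    solve_alt n = (List.range' 1 n.toNat).map aelem := by
  unfold solve_alt
  rw [foldl_append_map (fun k => (PySem.Int.ofStr? (PySem.Str.join ""
    (altDigits k []).reverse)).getD 0) (PySem.List.pyRange 1 (n + 1) 1) []]
  rw [PySem.List.pyRange_one, List.map_map]
  rw [show (n + 1 - 1 : ℤ) = n from by ring]
  rw [List.range'_eq_map_range, List.map_map]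
  apply List.map_congr_left
  intro k _
  show (PySem.Int.ofStr? (PySem.Str.join "" (altDigits (1 + (k : ℤ)) []).reverse)).getD 0
      = aelem (1 + k)
  rw [show (1 + (k : ℤ)) = ((1 + k : ℕ) : ℤ) from by push_cast; ring]
  rw [altDigits_eq (1 + k) []]
  simp only [List.nil_append, List.reverse_reverse]
  rfl

-- ===== VERDICT (by name: the statement is the Claim_ definition above) =====
theorem solve_spec : Claim_equal_solve := by
  intro n _
  unfold Spec_solve solve
  rw [solve_alt_eq]
  by_cases hn : 0 ≤ n
  · obtain ⟨T, hT, hres⟩ := loop_result n 0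
    have h0 : (List.range' 0 (2 * 0 + 1)).map (fun j => "" :: drep j) = [[""]] := by
      simp [List.range', drep]
    rw [show (3 * (0:ℕ) : ℤ) = 0 from by norm_num] at hres
    rw [show (List.range' 1 (3 * 0)).map aelem = [] from by simp] at hres
    rw [h0] at hres
    rw [hres, PySem.List.slice_to _ hn, ← List.map_take,
      take_range' n.toNat (3 * T) (by omega)]
  · -- n < 0: the loop never runs and both sides are []
    rw [solveLoop.eq_def, dif_neg (by omega)]
    rw [show n.toNat = 0 from by omega]
    simp [PySem.List.slice]
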